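-- pv_equiv track=rewrite | github.com/harkaranbrar7/Algorithm-Python | AngledBracket.py | solution
-- ===== SOURCE A (Python) =====
-- def solution(angles):
--     openCount = 0
--     addLeadOpentag = 0
--     for i in angles:
--         if i == '>':
--             if openCount == 0:
--                 addLeadOpentag = addLeadOpentag+1
--             else:
--                 openCount = openCount-1
--         else:
--             openCount = openCount+1
--
--     return '<'[:1]*addLeadOpentag + angles + '>'[:1]*openCount
-- ===== SOURCE B (Python) =====
-- def solution(angles):
--     # Divide and conquer: each segment reduces to (unmatched closers, unmatched openers);
--     # two halves merge by cancelling min(openers_left, closers_right) pairs.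
--     def red(lo, hi):
--         if hi - lo == 0:
--             return (0, 0)
--         if hi - lo == 1:
--             return (1, 0) if angles[lo] == '>' else (0, 1)
--         mid = (lo + hi) // 2
--         c1, o1 = red(lo, mid)
--         c2, o2 = red(mid, hi)
--         k = min(o1, c2)
--         return (c1 + c2 - k, o1 + o2 - k)
--     lead, trail = red(0, len(angles))
--     return '<' * lead + angles + '>' * trail
-- ===== Notes on version B (the rewrite author's own statement) =====
-- stated objective: alternative
-- what changed: Replaces A's linear greedy two-counter scan by a divide-and-conquer reduction: each half of the string is recursively reduced to a pair (unmatched closers, unmatched openers) and the halves are merged by cancelling min(openers_left, closers_right) pairs.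
import Mathlib
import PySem

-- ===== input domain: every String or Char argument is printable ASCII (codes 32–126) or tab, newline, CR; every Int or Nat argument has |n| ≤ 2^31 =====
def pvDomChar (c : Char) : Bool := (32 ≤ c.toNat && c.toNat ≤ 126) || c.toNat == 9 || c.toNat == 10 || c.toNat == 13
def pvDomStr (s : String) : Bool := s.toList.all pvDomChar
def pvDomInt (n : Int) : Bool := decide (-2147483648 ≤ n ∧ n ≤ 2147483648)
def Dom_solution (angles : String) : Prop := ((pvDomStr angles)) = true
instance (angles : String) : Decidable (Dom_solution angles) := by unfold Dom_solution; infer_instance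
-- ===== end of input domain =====

-- B replaces A's linear greedy two-counter scan by a divide-and-conquer reduction with a pair-cancelling merge; alternative decomposition, same value.


-- ===== PORT A =====
-- A's loop: state (openCount, addLeadOpentag)
def solAStep (st : Int × Int) (i : Char) : Int × Int :=
  if i = '>' then
    if st.1 = 0 then (st.1, st.2 + 1) else (st.1 - 1, st.2)
  else (st.1 + 1, st.2)

def solution (angles : String) : String :=
  let st := angles.toList.foldl solAStep (0, 0)
  String.mk (List.replicate st.2.toNat '<') ++ angles ++ String.mk (List.replicate st.1.toNat '>')

-- ===== PORT B =====
-- B's red(lo,hi): divide-and-conquer over the segment, returning (unmatched closers, unmatched openers);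
-- ported on the segment as a list, split at length/2 like (lo+hi)//2 splits the index range.
def solRed (l : List Char) : Int × Int :=
  match l with
  | [] => (0, 0)
  | [c] => if c = '>' then (1, 0) else (0, 1)
  | a :: b :: rest =>
    let mid := (a :: b :: rest).length / 2
    let p1 := solRed ((a :: b :: rest).take mid)
    let p2 := solRed ((a :: b :: rest).drop mid)
    let k := min p1.2 p2.1
    (p1.1 + p2.1 - k, p1.2 + p2.2 - k)
termination_by l.length
decreasing_by
  all_goals simp [List.length_take, List.length_drop]; omega

def solution_alt (angles : String) : String :=
  let p := solRed angles.toList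
  String.mk (List.replicate p.1.toNat '<') ++ angles ++ String.mk (List.replicate p.2.toNat '>')

-- ===== PRECONDITION & SPEC =====
def Spec_solution (angles : String) (out : String) : Prop := out = solution_alt angles
instance (angles : String) (out : String) : Decidable (Spec_solution angles out) := by unfold Spec_solution; infer_instance

-- ===== CLAIM (what is proved, stated in full; the proofs are below) =====
def Claim_equal_solution : Prop := ∀ (angles : String), Dom_solution angles → Spec_solution angles (solution angles)

-- ===== LEMMAS AND PROOFS =====
-- A's fold from (0,0): (unmatched openers, unmatched closers) of l
def pvP (l : List Char) : Int × Int := l.foldl solAStep (0, 0)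

-- Running A's loop from an arbitrary state (o,a) with o ≥ 0: the initial stock o absorbs
-- the earliest min(o, closers) underflows; plus nonnegativity of pvP's components.
lemma foldA_gen (l : List Char) : ∀ o a : Int, 0 ≤ o →
    l.foldl solAStep (o, a) =
      ((pvP l).1 + max (o - (pvP l).2) 0, a + max ((pvP l).2 - o) 0) ∧
    0 ≤ (pvP l).1 ∧ 0 ≤ (pvP l).2 := by
  induction l with
  | nil =>
    intro o a ho
    refine ⟨?_, by simp [pvP], by simp [pvP]⟩
    simp only [List.foldl_nil, pvP]
    apply Prod.ext <;> simp <;> omega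
  | cons c t ih =>
    intro o a ho
    have hP : pvP (c :: t) = t.foldl solAStep (solAStep (0, 0) c) := by
      simp [pvP]
    by_cases hc : c = '>'
    · subst hc
      have hbase := ih 0 1 le_rfl
      have hPc : pvP ('>' :: t) = ((pvP t).1, 1 + (pvP t).2) := by
        rw [hP]
        simp only [solAStep, if_true]
        rw [(ih 0 (0 + 1) le_rfl).1]
        have h1 := hbase.2.1; have h2 := hbase.2.2
        apply Prod.ext <;> simp <;> omega
      by_cases ho0 : o = 0
      · refine ⟨?_, ?_, ?_⟩
        · simp only [List.foldl_cons, solAStep, ho0, if_true]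
          rw [(ih 0 (a + 1) le_rfl).1, hPc]
          have h1 := hbase.2.1; have h2 := hbase.2.2
          apply Prod.ext <;> simp <;> omega
        · rw [hPc]; exact hbase.2.1
        · rw [hPc]; have := hbase.2.2; simp; omega
      · refine ⟨?_, ?_, ?_⟩
        · simp only [List.foldl_cons, solAStep, if_true, if_neg ho0]
          rw [(ih (o - 1) a (by omega)).1, hPc]
          have h1 := hbase.2.1; have h2 := hbase.2.2
          apply Prod.ext <;> simp <;> omega
        · rw [hPc]; exact hbase.2.1
        · rw [hPc]; have := hbase.2.2; simp; omega
    · have hbase := ih 1 0 (by omega)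
      have h1 := hbase.2.1; have h2 := hbase.2.2
      have hPc : pvP (c :: t) =
          ((pvP t).1 + max (1 - (pvP t).2) 0, max ((pvP t).2 - 1) 0) := by
        rw [hP]
        simp only [solAStep, if_neg hc]
        rw [(ih (0 + 1) 0 (by omega)).1]
        apply Prod.ext <;> simp
      refine ⟨?_, ?_, ?_⟩
      · simp only [List.foldl_cons, solAStep, if_neg hc]
        rw [(ih (o + 1) a (by omega)).1, hPc]
        apply Prod.ext <;> simp <;> omega
      · rw [hPc]; simp; omega
      · rw [hPc]; simp

lemma pvP_append (l1 l2 : List Char) :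
    pvP (l1 ++ l2) =
      ((pvP l2).1 + max ((pvP l1).1 - (pvP l2).2) 0,
       (pvP l1).2 + max ((pvP l2).2 - (pvP l1).1) 0) := by
  have h1 := (foldA_gen l1 0 0 le_rfl).2.1
  have := (foldA_gen l2 (pvP l1).1 (pvP l1).2 h1).1
  calc pvP (l1 ++ l2) = l2.foldl solAStep (pvP l1) := by
        simp [pvP, List.foldl_append]
    _ = _ := by rw [← this]

-- B's divide-and-conquer reduction computes exactly (closers, openers) = (pvP.2, pvP.1)
lemma solRed_eq : ∀ n (l : List Char), l.length ≤ n → solRed l = ((pvP l).2, (pvP l).1) := by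
  intro n
  induction n with
  | zero =>
    intro l hl
    have : l = [] := List.eq_nil_of_length_eq_zero (by omega)
    subst this; simp [solRed, pvP]
  | succ n ih =>
    intro l hl
    match l with
    | [] => simp [solRed, pvP]
    | [c] =>
      by_cases hc : c = '>' <;> simp [solRed, pvP, solAStep, hc]
    | a :: b :: rest =>
      rw [solRed]
      set L := a :: b :: rest with hL
      have hlen : 2 ≤ L.length := by simp [hL]
      set mid := L.length / 2 with hmid
      have hmid1 : 1 ≤ mid := by omega
      have hmidlt : mid < L.length := by omega
      have htk : (L.take mid).length ≤ n := by
        simp [List.length_take]; omega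
      have hdp : (L.drop mid).length ≤ n := by
        simp [List.length_drop]; omega
      rw [ih _ htk, ih _ hdp]
      have happ : L.take mid ++ L.drop mid = L := List.take_append_drop mid L
      have := pvP_append (L.take mid) (L.drop mid)
      rw [happ] at this
      have h1 := (foldA_gen (L.take mid) 0 0 le_rfl).2
      have h2 := (foldA_gen (L.drop mid) 0 0 le_rfl).2
      apply Prod.ext <;> simp [this] <;> omega

-- ===== VERDICT (by name: the statement is the Claim_ definition above) =====
theorem solution_spec : Claim_equal_solution := by
  intro angles _
  have h := solRed_eq angles.toList.length angles.toList le_rfl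
  simp only [Spec_solution, solution, solution_alt, h, pvP]
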